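-- pv_equiv track=rewrite | github.com/cirosantilli/project-euler-solutions | solvers/660.py | is_pandigital_triangle
-- ===== SOURCE A (Python) =====
-- def to_base_digits(x: int, base: int):
--     """Return digits of x in given base, most-significant first."""
--     assert x > 0 and base >= 2
--     ds = []
--     while x:
--         x, r = divmod(x, base)
--         ds.append(r)
--     ds.reverse()
--     return ds
--
-- def is_pandigital_triangle(a: int, b: int, c: int, base: int) -> bool:
--     """Slow, clear checker: used for the problem-statement example assert."""
--     L = max(a, b, c)
--     if L == a:
--         x, y = b, c
--     elif L == b:
--         x, y = a, c
--     else: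
--         x, y = a, b
--     if L * L != x * x + y * y + x * y:
--         return False
--
--     seen = 0
--     cnt = 0
--     full = (1 << base) - 1
--     for v in (a, b, c):
--         for d in to_base_digits(v, base):
--             bit = 1 << d
--             if seen & bit:
--                 return False
--             seen |= bit
--             cnt += 1
--     return cnt == base and seen == full
-- ===== SOURCE B (Python) =====
-- def to_base_digits(x: int, base: int):
--     """Return digits of x in given base, most-significant first."""
--     assert x > 0 and base >= 2
--     ds = []
--     while x:
--         x, r = divmod(x, base)
--         ds.append(r)
--     ds.reverse()
--     return ds
--
-- def is_pandigital_triangle(a: int, b: int, c: int, base: int) -> bool: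
--     L = max(a, b, c)
--     if L == a:
--         x, y = b, c
--     elif L == b:
--         x, y = a, c
--     else:
--         x, y = a, b
--     if L * L != x * x + y * y + x * y:
--         return False
--     all_digits = []
--     for v in (a, b, c):
--         all_digits.extend(to_base_digits(v, base))
--     return sorted(all_digits) == list(range(base))
-- ===== Notes on version B (the rewrite author's own statement) =====
-- stated objective: simpler
-- what changed: The incremental bitmask accumulator with early-exit duplicate detection is replaced by collecting all base-digits of a, b, c into one list and comparing its sorted form against list(range(base)) in a single sort-then-compare step.
-- outside the precondition, e.g. on is_pandigital_triangle(3, -3, 3, 2): A returns False, B raises AssertionError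
import Mathlib
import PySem

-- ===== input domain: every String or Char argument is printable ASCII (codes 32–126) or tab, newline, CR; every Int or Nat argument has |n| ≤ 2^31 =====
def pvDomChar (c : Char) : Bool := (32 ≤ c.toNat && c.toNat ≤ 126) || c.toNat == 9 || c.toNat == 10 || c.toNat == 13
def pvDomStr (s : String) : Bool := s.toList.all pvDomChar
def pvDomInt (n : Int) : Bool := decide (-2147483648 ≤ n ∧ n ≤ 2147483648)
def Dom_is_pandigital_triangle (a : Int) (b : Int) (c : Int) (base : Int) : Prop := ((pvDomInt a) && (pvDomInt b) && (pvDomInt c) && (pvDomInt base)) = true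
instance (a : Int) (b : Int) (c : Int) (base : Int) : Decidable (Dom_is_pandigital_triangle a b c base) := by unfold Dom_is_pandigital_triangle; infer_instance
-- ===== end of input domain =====

-- B replaces A's incremental bitmask-with-early-exit pandigитality scan by collecting all
-- base digits once and comparing their sorted order with range(base) (objective: simpler).

-- ===== PORT A =====
-- the `while x:` loop of to_base_digits as fuel recursion; on the admitted inputs
-- (x > 0, base ≥ 2) the digit count is at most x, so fuel x.toNat is enough.
def to_base_digits_loop : Nat → Int → Int → List Int
  | 0, _, _ => []
  | fuel + 1, x, base =>
    if x = 0 then []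
    else PySem.Int.mod x base :: to_base_digits_loop fuel (PySem.Int.floordiv x base) base

-- helper shared by both Python versions (Source B reuses A's to_base_digits verbatim);
-- ds.append then ds.reverse() = collect remainders least-significant first, then reverse
def to_base_digits (x : Int) (base : Int) : List Int :=
  (to_base_digits_loop x.toNat x base).reverse

-- one digit step of A's inner loop; `none` models the early `return False`.
-- d is a remainder of the positive base on every admitted input, so `d.toNat` is exact.
def scanDigit (st : Option (Int × Int)) (d : Int) : Option (Int × Int) :=
  match st with
  | none => none
  | some (seen, cnt) =>
    let bit : Int := (1 : Int) <<< d.toNat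
    if PySem.Int.band seen bit ≠ 0 then none
    else some (PySem.Int.bor seen bit, cnt + 1)

def is_pandigital_triangle (a : Int) (b : Int) (c : Int) (base : Int) : Bool :=
  let L := max a (max b c)
  let xy := if L = a then (b, c) else if L = b then (a, c) else (a, b)
  let x := xy.1
  let y := xy.2
  if L * L ≠ x * x + y * y + x * y then false
  else
    -- full = (1 << base) - 1; base ≥ 2 on every admitted input, so `.toNat` is exact
    let full : Int := ((1 : Int) <<< base.toNat) - 1
    match [a, b, c].foldl (fun st v => (to_base_digits v base).foldl scanDigit st) (some (0, 0)) with
    | none => false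
    | some (seen, cnt) => decide (cnt = base) && decide (seen = full)

-- ===== PORT B =====
def is_pandigital_triangle_alt (a : Int) (b : Int) (c : Int) (base : Int) : Bool :=
  let L := max a (max b c)
  let xy := if L = a then (b, c) else if L = b then (a, c) else (a, b)
  let x := xy.1
  let y := xy.2
  if L * L ≠ x * x + y * y + x * y then false
  else
    let all_digits := [a, b, c].foldl (fun acc v => acc ++ to_base_digits v base) []
    PySem.List.sorted all_digits (fun d => d) == PySem.List.pyRange 0 base

-- ===== PRECONDITION & SPEC =====
-- the triangle test A performs before any digit work (same max tie-breaking as Python's)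
def pyTriCheck (a : Int) (b : Int) (c : Int) : Bool :=
  if max a (max b c) = a then decide (max a (max b c) * max a (max b c) = b * b + c * c + b * c)
  else if max a (max b c) = b then decide (max a (max b c) * max a (max b c) = a * a + c * c + a * c)
  else decide (max a (max b c) * max a (max b c) = a * a + b * b + a * b)

-- Pre_ excludes the inputs on which A raises once the triangle test passes (the assert
-- x > 0 and base >= 2 in to_base_digits, or 1 << base with negative base), together with
-- the early-return corner where a duplicate digit of an earlier argument hides a
-- nonpositive later argument: B builds all three digit lists up front and raises there.
def Pre_is_pandigital_triangle (a : Int) (b : Int) (c : Int) (base : Int) : Prop :=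
  pyTriCheck a b c = true → (2 ≤ base ∧ 0 < a ∧ 0 < b ∧ 0 < c)
instance (a : Int) (b : Int) (c : Int) (base : Int) : Decidable (Pre_is_pandigital_triangle a b c base) := by unfold Pre_is_pandigital_triangle; infer_instance

def pvWitness_is_pandigital_triangle : Int × Int × Int × Int := (3, 5, 7, 2)

def Spec_is_pandigital_triangle (a : Int) (b : Int) (c : Int) (base : Int) (out : Bool) : Prop := out = is_pandigital_triangle_alt a b c base
instance (a : Int) (b : Int) (c : Int) (base : Int) (out : Bool) : Decidable (Spec_is_pandigital_triangle a b c base out) := by unfold Spec_is_pandigital_triangle; infer_instance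

-- ===== CLAIM (what is proved, stated in full; the proofs are below) =====
def Claim_equal_is_pandigital_triangle : Prop := ∀ (a : Int) (b : Int) (c : Int) (base : Int), Dom_is_pandigital_triangle a b c base → Pre_is_pandigital_triangle a b c base → Spec_is_pandigital_triangle a b c base (is_pandigital_triangle a b c base)

-- ===== LEMMAS AND PROOFS =====

-- digits produced by to_base_digits are remainders mod base, hence in [0, base)
lemma to_base_digits_loop_bound (base : Int) (hb : 0 < base) :
    ∀ (fuel : Nat) (x d : Int), d ∈ to_base_digits_loop fuel x base → 0 ≤ d ∧ d < base := by
  intro fuel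
  induction fuel with
  | zero => intro x d hd; simp [to_base_digits_loop] at hd
  | succ f ih =>
    intro x d hd
    rw [to_base_digits_loop] at hd
    by_cases hx : x = 0
    · simp [hx] at hd
    · rw [if_neg hx] at hd
      rcases List.mem_cons.mp hd with h | h
      · exact h ▸ ⟨PySem.Int.mod_nonneg x hb, PySem.Int.mod_lt x hb⟩
      · exact ih _ d h

lemma to_base_digits_bound (x base : Int) (hb : 0 < base) :
    ∀ d ∈ to_base_digits x base, 0 ≤ d ∧ d < base := by
  intro d hd
  rw [to_base_digits, List.mem_reverse] at hd
  exact to_base_digits_loop_bound base hb _ x d hd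

-- Nat mirror of scanDigit used only in the proofs
def scanNStep (st : Option (Nat × Nat)) (d : Nat) : Option (Nat × Nat) :=
  match st with
  | none => none
  | some (s, c) => if s &&& 2 ^ d ≠ 0 then none else some (s ||| 2 ^ d, c + 1)

def orMask (l : List Nat) (s : Nat) : Nat := l.foldl (fun s d => s ||| 2 ^ d) s

lemma foldl_scanDigit_none (l : List Int) : l.foldl scanDigit none = none := by
  induction l with
  | nil => rfl
  | cons d l ih => simpa [scanDigit] using ih

lemma foldl_scanNStep_none (l : List Nat) : l.foldl scanNStep none = none := by
  induction l with
  | nil => rfl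
  | cons d l ih => simpa [scanNStep] using ih

lemma one_shiftLeft_int (k : Nat) : (1 : Int) <<< k = ((2 ^ k : Nat) : Int) := by
  rw [Int.shiftLeft_eq]; push_cast; ring

lemma band_cast_pow (s k : Nat) :
    PySem.Int.band (s : Int) ((2 : Int) ^ k) = ((s &&& 2 ^ k : Nat) : Int) := by
  rw [show ((2 : Int) ^ k) = ((2 ^ k : Nat) : Int) by push_cast; ring, PySem.Int.band_natCast]

lemma bor_cast_pow (s k : Nat) :
    PySem.Int.bor (s : Int) ((2 : Int) ^ k) = ((s ||| 2 ^ k : Nat) : Int) := by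
  rw [show ((2 : Int) ^ k) = ((2 ^ k : Nat) : Int) by push_cast; ring, PySem.Int.bor_natCast]

-- the Int scan is the Nat scan on the toNat-images of the digits
lemma scan_corr (l : List Int) (s c : Nat) :
    l.foldl scanDigit (some ((s : Int), (c : Int))) =
      ((l.map Int.toNat).foldl scanNStep (some (s, c))).map
        (fun p => ((p.1 : Int), (p.2 : Int))) := by
  induction l generalizing s c with
  | nil => rfl
  | cons d l ih =>
    simp only [List.foldl_cons, List.map_cons]
    by_cases hz : s &&& 2 ^ d.toNat = 0
    · have h1 : scanDigit (some ((s : Int), (c : Int))) d =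
          some (((s ||| 2 ^ d.toNat : Nat) : Int), ((c + 1 : Nat) : Int)) := by
        simp [scanDigit, one_shiftLeft_int, band_cast_pow, bor_cast_pow, hz]
      have h2 : scanNStep (some (s, c)) d.toNat = some (s ||| 2 ^ d.toNat, c + 1) := by
        simp [scanNStep, hz]
      rw [h1, h2, ih]
    · have h1 : scanDigit (some ((s : Int), (c : Int))) d = none := by
        simp [scanDigit, one_shiftLeft_int, band_cast_pow, hz]
      have h2 : scanNStep (some (s, c)) d.toNat = none := by
        simp [scanNStep, hz]
      rw [h1, h2, foldl_scanDigit_none, foldl_scanNStep_none]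
      rfl

lemma and_two_pow_eq_zero (s d : Nat) : s &&& 2 ^ d = 0 ↔ s.testBit d = false := by
  rw [Nat.and_two_pow]
  cases h : s.testBit d <;> simp [h, Nat.pow_eq_zero]

-- what the Nat scan computes: the or-mask and the running count, or none on a repeat
lemma scanN_char (l : List Nat) (s c : Nat) :
    l.foldl scanNStep (some (s, c)) =
      if (∀ d ∈ l, s.testBit d = false) ∧ l.Nodup then some (orMask l s, c + l.length)
      else none := by
  induction l generalizing s c with
  | nil => simp [orMask]
  | cons d l ih =>
    simp only [List.foldl_cons]
    by_cases hz : s &&& 2 ^ d = 0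
    · have hstep : scanNStep (some (s, c)) d = some (s ||| 2 ^ d, c + 1) := by
        simp [scanNStep, hz]
      rw [hstep, ih]
      have htb : s.testBit d = false := (and_two_pow_eq_zero s d).mp hz
      by_cases hcond : (∀ e ∈ l, s.testBit e = false) ∧ d ∉ l ∧ l.Nodup
      · obtain ⟨h1, h2, h3⟩ := hcond
        rw [if_pos, if_pos]
        · refine congrArg some (Prod.ext rfl ?_)
          simp only [List.length_cons]
          omega
        · refine ⟨?_, by simp [List.nodup_cons, h2, h3]⟩
          intro e he
          rcases List.mem_cons.mp he with rfl | he
          · exact htb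
          · exact h1 e he
        · refine ⟨?_, h3⟩
          intro e he
          rw [Nat.testBit_or, h1 e he, Nat.testBit_two_pow]
          simp only [Bool.false_or, decide_eq_false_iff_not]
          rintro rfl
          exact absurd he h2
      · rw [if_neg, if_neg]
        · rintro ⟨h1, h2⟩
          rw [List.nodup_cons] at h2
          exact hcond ⟨fun e he => h1 e (List.mem_cons_of_mem d he), h2.1, h2.2⟩
        · rintro ⟨h1, h2⟩
          refine hcond ⟨?_, ?_, h2⟩
          · intro e he
            have h := h1 e he
            rw [Nat.testBit_or] at h
            exact (Bool.or_eq_false_iff.mp h).1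
          · intro hdl
            have h := h1 d hdl
            rw [Nat.testBit_or, Nat.testBit_two_pow] at h
            simp at h
    · have hstep : scanNStep (some (s, c)) d = none := by
        simp [scanNStep, hz]
      rw [hstep, foldl_scanNStep_none, if_neg]
      rintro ⟨h1, -⟩
      have := h1 d List.mem_cons_self
      rw [(and_two_pow_eq_zero s d).mpr this] at hz
      exact hz rfl

lemma orMask_testBit (l : List Nat) (s : Nat) (e : Nat) :
    (orMask l s).testBit e = (s.testBit e || decide (e ∈ l)) := by
  induction l generalizing s with
  | nil => simp [orMask]
  | cons d l ih =>
    simp only [orMask, List.foldl_cons] at *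
    rw [ih]
    rw [Nat.testBit_or, Nat.testBit_two_pow]
    rcases eq_or_ne d e with rfl | h
    · simp [List.mem_cons]
    · simp [h, h.symm, List.mem_cons]

-- a nodup bounded Nat list is a permutation of range n iff it has length n and full mask
lemma nodup_char (n : Nat) (l : List Nat) :
    (l.length = n ∧ orMask l 0 = 2 ^ n - 1) ↔ l.Perm (List.range n) := by
  constructor
  · rintro ⟨hlen, hmask⟩
    have hsub : List.range n ⊆ l := by
      intro d hd
      have hdn : d < n := List.mem_range.mp hd
      have := congrArg (fun m => m.testBit d) hmask
      simp only [orMask_testBit, Nat.zero_testBit, Bool.false_or,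
        Nat.testBit_two_pow_sub_one] at this
      simpa [hdn] using this
    have hsp : (List.range n).Subperm l := List.subperm_of_subset List.nodup_range hsub
    exact (hsp.perm_of_length_le (by rw [hlen, List.length_range])).symm
  · intro hp
    refine ⟨by rw [hp.length_eq, List.length_range], ?_⟩
    apply Nat.eq_of_testBit_eq
    intro i
    rw [orMask_testBit, Nat.testBit_two_pow_sub_one]
    simp [Nat.zero_testBit, hp.mem_iff, List.mem_range]

-- the heart of the equivalence: on any digit list with digits in [0, base),
-- A's mask-and-count verdict equals B's sorted-equals-range verdict
lemma pandigital_core (base : Int) (hbase : 2 ≤ base) (ds : List Int)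
    (hd : ∀ d ∈ ds, 0 ≤ d ∧ d < base) :
    (match ds.foldl scanDigit (some ((0 : Int), (0 : Int))) with
     | none => false
     | some (seen, cnt) =>
        decide (cnt = base) && decide (seen = ((1 : Int) <<< base.toNat) - 1))
    = (PySem.List.sorted ds (fun d => d) == PySem.List.pyRange 0 base) := by
  have hb0 : (0 : Int) ≤ base := by omega
  have hbn : ((base.toNat : Nat) : Int) = base := Int.toNat_of_nonneg hb0
  have hds : (ds.map Int.toNat).map (fun k : Nat => (k : Int)) = ds := by
    rw [List.map_map]
    calc ds.map ((fun k : Nat => (k : Int)) ∘ Int.toNat)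
        = ds.map id := List.map_congr_left
          (by intro d hm; simpa using Int.toNat_of_nonneg (hd d hm).1)
      _ = ds := List.map_id ds
  have hrange : PySem.List.pyRange 0 base = (List.range base.toNat).map (fun k : Nat => (k : Int)) := by
    rw [PySem.List.pyRange_one]; simp
  have hpermN : ds.Perm (PySem.List.pyRange 0 base) ↔
      (ds.map Int.toNat).Perm (List.range base.toNat) := by
    constructor
    · intro hp
      have h := hp.map Int.toNat
      rw [hrange, List.map_map] at h
      have hid : List.map (Int.toNat ∘ fun k : Nat => (k : Int)) (List.range base.toNat)
          = List.range base.toNat := by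
        simp [Function.comp_def]
      rwa [hid] at h
    · intro hp
      have h := hp.map (fun k : Nat => (k : Int))
      rw [hds] at h
      rw [hrange]; exact h
  have hB : (PySem.List.sorted ds (fun d => d) = PySem.List.pyRange 0 base) ↔
      ds.Perm (PySem.List.pyRange 0 base) := by
    constructor
    · intro h
      have hp := PySem.List.sorted_perm ds (fun d => d) false
      rw [h] at hp; exact hp.symm
    · intro hp
      exact PySem.List.sorted_eq_of_perm_of_pairwise_lt ds _ (fun d => d) hp.symm
        (PySem.List.pairwise_lt_pyRange_one 0 base)
  have hbeq : (PySem.List.sorted ds (fun d => d) == PySem.List.pyRange 0 base)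
      = decide (ds.Perm (PySem.List.pyRange 0 base)) := by
    by_cases h : PySem.List.sorted ds (fun d => d) = PySem.List.pyRange 0 base
    · simp [h, hB.mp h]
    · have h1 : (PySem.List.sorted ds (fun d => d) == PySem.List.pyRange 0 base) = false := by
        rw [beq_eq_false_iff_ne]; exact h
      have h2 : decide (ds.Perm (PySem.List.pyRange 0 base)) = false := by
        simp only [decide_eq_false_iff_not]
        exact fun hp => h (hB.mpr hp)
      rw [h1, h2]
  rw [show (some ((0 : Int), (0 : Int)) : Option (Int × Int))
        = some (((0 : Nat) : Int), ((0 : Nat) : Int)) by norm_num]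
  rw [scan_corr, scanN_char, hbeq]
  by_cases hnd : (ds.map Int.toNat).Nodup
  · rw [if_pos ⟨fun d _ => Nat.zero_testBit d, hnd⟩]
    simp only [Option.map_some, Nat.zero_add]
    rw [one_shiftLeft_int]
    have hlen : (ds.map Int.toNat).length = ds.length := List.length_map ..
    have hiff : ((ds.length : Int) = base ∧
        ((orMask (ds.map Int.toNat) 0 : Nat) : Int) = ((2 ^ base.toNat : Nat) : Int) - 1) ↔
        ds.Perm (PySem.List.pyRange 0 base) := by
      rw [hpermN, ← nodup_char base.toNat (ds.map Int.toNat)]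
      have hpow : 1 ≤ 2 ^ base.toNat := Nat.one_le_two_pow
      constructor
      · rintro ⟨hl1, hl2⟩
        exact ⟨by omega, by omega⟩
      · rintro ⟨hl1, hl2⟩
        exact ⟨by omega, by omega⟩
    by_cases hp : ds.Perm (PySem.List.pyRange 0 base)
    · obtain ⟨e1, e2⟩ := hiff.mpr hp
      simp [e1, e2, hp]
    · have hna : ¬ ((ds.length : Int) = base ∧
          ((orMask (ds.map Int.toNat) 0 : Nat) : Int) = ((2 ^ base.toNat : Nat) : Int) - 1) :=
        fun hxy => hp (hiff.mp hxy)
      by_cases hX : (ds.length : Int) = base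
      · have hY : ¬ ((orMask (ds.map Int.toNat) 0 : Nat) : Int)
            = ((2 ^ base.toNat : Nat) : Int) - 1 := fun hy => hna ⟨hX, hy⟩
        have hY' : ¬ ((orMask (ds.map Int.toNat) 0 : Nat) : Int)
            = (2 : Int) ^ base.toNat - 1 := by
          push_cast at hY ⊢; exact hY
        simp [hX, hY', hp]
      · simp [hX, hp]
  · rw [if_neg fun hcon => hnd hcon.2]
    simp only [Option.map_none]
    have hnp : ¬ ds.Perm (PySem.List.pyRange 0 base) :=
      fun hp => hnd ((hpermN.mp hp).nodup_iff.mpr List.nodup_range)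
    simp [hnp]

-- after the shared triangle prelude passes, the two ports agree
lemma after_tri (a b c base : Int) (hbase : 2 ≤ base) :
    (match [a, b, c].foldl (fun st v => (to_base_digits v base).foldl scanDigit st)
        (some ((0 : Int), (0 : Int))) with
     | none => false
     | some (seen, cnt) =>
        decide (cnt = base) && decide (seen = ((1 : Int) <<< base.toNat) - 1))
    = (PySem.List.sorted ([a, b, c].foldl (fun acc v => acc ++ to_base_digits v base) [])
        (fun d => d) == PySem.List.pyRange 0 base) := by
  have hb0 : (0 : Int) < base := by omega
  have h1 : [a, b, c].foldl (fun st v => (to_base_digits v base).foldl scanDigit st)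
      (some ((0 : Int), (0 : Int)))
      = ((to_base_digits a base ++ to_base_digits b base) ++ to_base_digits c base).foldl
          scanDigit (some ((0 : Int), (0 : Int))) := by
    simp only [List.foldl_cons, List.foldl_nil, List.foldl_append]
  have h2 : [a, b, c].foldl (fun acc v => acc ++ to_base_digits v base) []
      = (to_base_digits a base ++ to_base_digits b base) ++ to_base_digits c base := by
    simp only [List.foldl_cons, List.foldl_nil, List.nil_append]
  rw [h1, h2]
  apply pandigital_core base hbase
  intro d hd
  rcases List.mem_append.mp hd with hd | hd
  · rcases List.mem_append.mp hd with hd | hd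
    · exact to_base_digits_bound a base hb0 d hd
    · exact to_base_digits_bound b base hb0 d hd
  · exact to_base_digits_bound c base hb0 d hd

-- ===== VERDICT (by name: the statement is the Claim_ definition above) =====
theorem is_pandigital_triangle_spec : Claim_equal_is_pandigital_triangle := by
  intro a b c base _ hpre
  unfold Spec_is_pandigital_triangle is_pandigital_triangle is_pandigital_triangle_alt
  dsimp only
  split_ifs with h1 h2 h3 h4 h5 h6 <;> try rfl
  all_goals refine after_tri a b c base (hpre ?_).1
  all_goals unfold pyTriCheck
  all_goals simp_all
  all_goals (left; omega)
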